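-- pv_equiv track=rewrite | github.com/stranske/Pension-Data | src/pension_data/query/sql_service.py | _strip_sql_comments_and_strings
-- ===== SOURCE A (Python) =====
-- def _strip_sql_comments_and_strings(sql: str) -> str:
--     result: list[str] = []
--     index = 0
--     in_single = False
--     in_double = False
--     in_line_comment = False
--     in_block_comment = False
--     while index < len(sql):
--         current = sql[index]
--         nxt = sql[index + 1] if index + 1 < len(sql) else ""
--
--         if in_line_comment:
--             if current == "\n":
--                 in_line_comment = False
--                 result.append("\n")
--             else:
--                 result.append(" ")
--             index += 1
--             continue
--         if in_block_comment:
--             if current == "*" and nxt == "/":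
--                 in_block_comment = False
--                 result.extend((" ", " "))
--                 index += 2
--             else:
--                 result.append(" ")
--                 index += 1
--             continue
--         if in_single:
--             if current == "'" and nxt == "'":
--                 result.extend((" ", " "))
--                 index += 2
--                 continue
--             if current == "'":
--                 in_single = False
--             result.append(" ")
--             index += 1
--             continue
--         if in_double:
--             if current == '"' and nxt == '"':
--                 result.extend((" ", " "))
--                 index += 2
--                 continue
--             if current == '"':
--                 in_double = False
--             result.append(" ")
--             index += 1
--             continue
--
--         if current == "-" and nxt == "-":
--             in_line_comment = True
--             result.extend((" ", " "))
--             index += 2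
--             continue
--         if current == "/" and nxt == "*":
--             in_block_comment = True
--             result.extend((" ", " "))
--             index += 2
--             continue
--         if current == "'":
--             in_single = True
--             result.append(" ")
--             index += 1
--             continue
--         if current == '"':
--             in_double = True
--             result.append(" ")
--             index += 1
--             continue
--         result.append(current)
--         index += 1
--     return "".join(result)
-- ===== SOURCE B (Python) =====
-- def _strip_sql_comments_and_strings(sql: str) -> str:
--     out: list[str] = []
--     i = 0
--     n = len(sql)
--     while i < n:
--         c = sql[i]
--         if c == "-" and sql.startswith("--", i):
--             j = sql.find("\n", i + 2)
--             if j < 0: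
--                 j = n
--             out.append(" " * (j - i))  # the newline itself is kept by the next pass
--             i = j
--         elif c == "/" and sql.startswith("/*", i):
--             j = sql.find("*/", i + 2)
--             j = n if j < 0 else j + 2
--             out.append(" " * (j - i))
--             i = j
--         elif c == "'" or c == '"':
--             j = i + 1
--             while j < n:
--                 if sql[j] == c:
--                     if j + 1 < n and sql[j + 1] == c:
--                         j += 2
--                     else:
--                         j += 1
--                         break
--                 else:
--                     j += 1
--             out.append(" " * (j - i))
--             i = j
--         else:
--             out.append(c)
--             i += 1
--     return "".join(out)
-- ===== Notes on version B (the rewrite author's own statement) =====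
-- stated objective: alternative
-- what changed: Replaced the per-character scanner with four boolean state flags by a span-based scanner that locates each comment/string span (via find / an inner scan) and blanks it in one chunk, so no cross-iteration state remains.
import Mathlib
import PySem

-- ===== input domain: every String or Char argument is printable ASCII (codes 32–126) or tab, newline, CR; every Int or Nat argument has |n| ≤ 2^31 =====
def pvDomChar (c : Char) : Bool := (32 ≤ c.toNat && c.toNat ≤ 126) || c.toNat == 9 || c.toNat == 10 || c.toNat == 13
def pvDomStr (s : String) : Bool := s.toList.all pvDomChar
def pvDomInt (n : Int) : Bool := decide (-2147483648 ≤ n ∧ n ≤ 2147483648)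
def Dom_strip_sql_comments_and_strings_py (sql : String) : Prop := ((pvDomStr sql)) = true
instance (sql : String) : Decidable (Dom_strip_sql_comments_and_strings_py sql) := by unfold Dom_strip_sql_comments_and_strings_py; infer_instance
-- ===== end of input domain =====

-- B replaces A's per-character four-flag state machine by a span scanner that locates each
-- comment/string span and blanks it in one chunk (objective: simpler/idiomatic; same O(n) cost).

-- ===== PORT A =====
-- A's while-loop with index and flags in_single/in_double/in_line_comment/in_block_comment,
-- as structural recursion consuming the scanned prefix; `rest.head?` is Python's `nxt`
-- (none ↔ nxt = ""), consuming two characters = recursing on `rest.tail`.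
def stripA : List Char → Bool → Bool → Bool → Bool → List Char
  | [], _, _, _, _ => []
  | c :: rest, inS, inD, inL, inB =>
    if inL then
      if c = '\n' then '\n' :: stripA rest inS inD false inB
      else ' ' :: stripA rest inS inD true inB
    else if inB then
      if c = '*' ∧ rest.head? = some '/' then ' ' :: ' ' :: stripA rest.tail inS inD inL false
      else ' ' :: stripA rest inS inD inL true
    else if inS then
      if c = '\'' ∧ rest.head? = some '\'' then ' ' :: ' ' :: stripA rest.tail true inD inL inB
      else if c = '\'' then ' ' :: stripA rest false inD inL inB
      else ' ' :: stripA rest true inD inL inB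
    else if inD then
      if c = '"' ∧ rest.head? = some '"' then ' ' :: ' ' :: stripA rest.tail inS true inL inB
      else if c = '"' then ' ' :: stripA rest inS false inL inB
      else ' ' :: stripA rest inS true inL inB
    else
      if c = '-' ∧ rest.head? = some '-' then ' ' :: ' ' :: stripA rest.tail inS inD true inB
      else if c = '/' ∧ rest.head? = some '*' then ' ' :: ' ' :: stripA rest.tail inS inD inL true
      else if c = '\'' then ' ' :: stripA rest true inD inL inB
      else if c = '"' then ' ' :: stripA rest inS true inL inB
      else c :: stripA rest inS inD inL inB
  termination_by cs _ _ _ _ => cs.length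
  decreasing_by all_goals cases rest <;> simp

def strip_sql_comments_and_strings_py (sql : String) : String :=
  String.mk (stripA sql.toList false false false false)

-- ===== PORT B =====
-- B's `sql.find("\n", i)`: chars skipped before the first '\n' (newline left in the remainder).
def scanToNl : List Char → Nat × List Char
  | [] => (0, [])
  | c :: r => if c = '\n' then (0, c :: r)
              else ((scanToNl r).1 + 1, (scanToNl r).2)

-- B's `sql.find("*/", i+2)`: chars skipped up to and including the terminating "*/".
def scanToBlockEnd : List Char → Nat × List Char
  | [] => (0, [])
  | c :: r => if c = '*' ∧ r.head? = some '/' then (2, r.tail)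
              else ((scanToBlockEnd r).1 + 1, (scanToBlockEnd r).2)

-- B's inner while-loop: chars of a quoted string after the opening quote, with '' escapes.
def scanToQuoteEnd (q : Char) : List Char → Nat × List Char
  | [] => (0, [])
  | c :: r =>
    if c = q then
      if r.head? = some q then ((scanToQuoteEnd q r.tail).1 + 2, (scanToQuoteEnd q r.tail).2)
      else (1, r)
    else ((scanToQuoteEnd q r).1 + 1, (scanToQuoteEnd q r).2)
  termination_by cs => cs.length
  decreasing_by all_goals cases r <;> simp

theorem scanToNl_le : ∀ cs : List Char, (scanToNl cs).2.length ≤ cs.length := by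
  intro cs; induction cs with
  | nil => simp [scanToNl]
  | cons c r ih => simp only [scanToNl]; split <;> simp <;> omega

theorem scanToBlockEnd_le : ∀ cs : List Char, (scanToBlockEnd cs).2.length ≤ cs.length := by
  intro cs; induction cs with
  | nil => simp [scanToBlockEnd]
  | cons c r ih =>
    simp only [scanToBlockEnd]; split
    · cases r <;> simp <;> omega
    · simp; omega

theorem scanToQuoteEnd_le (q : Char) : ∀ cs : List Char, (scanToQuoteEnd q cs).2.length ≤ cs.length := by
  intro cs
  induction hn : cs.length using Nat.strong_induction_on generalizing cs with
  | _ n ih =>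
    cases cs with
    | nil => simp [scanToQuoteEnd]
    | cons c r =>
      simp only [scanToQuoteEnd]; split
      · split
        · have h1 : r.tail.length < n := by subst hn; cases r <;> simp <;> omega
          have h2 := ih _ h1 r.tail rfl
          have h3 : r.tail.length ≤ r.length := by cases r <;> simp
          simp at hn ⊢; omega
        · simp at hn ⊢; omega
      · have h1 : r.length < n := by simp at hn; omega
        have h2 := ih _ h1 r rfl
        simp at hn ⊢; omega

-- B's main loop: jump over each span, blanking it as one chunk.
def stripB : List Char → List Char
  | [] => []
  | c :: rest =>
    if c = '-' ∧ rest.head? = some '-' then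
      List.replicate ((scanToNl rest.tail).1 + 2) ' ' ++ stripB (scanToNl rest.tail).2
    else if c = '/' ∧ rest.head? = some '*' then
      List.replicate ((scanToBlockEnd rest.tail).1 + 2) ' ' ++ stripB (scanToBlockEnd rest.tail).2
    else if c = '\'' ∨ c = '"' then
      List.replicate ((scanToQuoteEnd c rest).1 + 1) ' ' ++ stripB (scanToQuoteEnd c rest).2
    else c :: stripB rest
  termination_by cs => cs.length
  decreasing_by
    · have := scanToNl_le rest.tail
      have : rest.tail.length ≤ rest.length := by cases rest <;> simp
      have := scanToNl_le rest.tail; simp; omega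
    · have := scanToBlockEnd_le rest.tail
      have : rest.tail.length ≤ rest.length := by cases rest <;> simp
      simp; omega
    · have := scanToQuoteEnd_le c rest; simp; omega
    · simp

def strip_sql_comments_and_strings_py_alt (sql : String) : String :=
  String.mk (stripB sql.toList)

-- ===== PRECONDITION & SPEC =====
def Spec_strip_sql_comments_and_strings_py (sql : String) (out : String) : Prop := out = strip_sql_comments_and_strings_py_alt sql
instance (sql : String) (out : String) : Decidable (Spec_strip_sql_comments_and_strings_py sql out) := by unfold Spec_strip_sql_comments_and_strings_py; infer_instance

-- ===== CLAIM (what is proved, stated in full; the proofs are below) =====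
def Claim_equal_strip_sql_comments_and_strings_py : Prop := ∀ (sql : String), Dom_strip_sql_comments_and_strings_py sql → Spec_strip_sql_comments_and_strings_py sql (strip_sql_comments_and_strings_py sql)

-- ===== LEMMAS AND PROOFS =====

-- A in line-comment state blanks exactly the characters scanToNl skips.
theorem stripA_line : ∀ cs : List Char,
    stripA cs false false true false =
      List.replicate (scanToNl cs).1 ' ' ++ stripA (scanToNl cs).2 false false false false := by
  intro cs; induction cs with
  | nil => simp [stripA, scanToNl]
  | cons c r ih =>
    by_cases h : c = '\n'
    · subst h; simp [stripA, scanToNl]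
    · simp [stripA, scanToNl, h, List.replicate_succ, ih]

theorem stripA_block : ∀ cs : List Char,
    stripA cs false false false true =
      List.replicate (scanToBlockEnd cs).1 ' ' ++ stripA (scanToBlockEnd cs).2 false false false false := by
  intro cs; induction cs with
  | nil => simp [stripA, scanToBlockEnd]
  | cons c r ih =>
    by_cases h : c = '*' ∧ r.head? = some '/'
    · simp [stripA, scanToBlockEnd, h, List.replicate_succ]
    · simp [stripA, scanToBlockEnd, h, List.replicate_succ, ih]

theorem stripA_single : ∀ cs : List Char,
    stripA cs true false false false =
      List.replicate (scanToQuoteEnd '\'' cs).1 ' ' ++ stripA (scanToQuoteEnd '\'' cs).2 false false false false := by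
  intro cs
  induction hn : cs.length using Nat.strong_induction_on generalizing cs with
  | _ n ih =>
    cases cs with
    | nil => simp [stripA, scanToQuoteEnd]
    | cons c r =>
      by_cases h1 : c = '\'' ∧ r.head? = some '\''
      · have hlt : r.tail.length < n := by subst hn; cases r <;> simp <;> omega
        simp [stripA, scanToQuoteEnd, h1, List.replicate_succ, ih _ hlt r.tail rfl]
      · by_cases h2 : c = '\''
        · have h5 : ¬ r.head? = some '\'' := fun hh => h1 ⟨h2, hh⟩
          simp [stripA, scanToQuoteEnd, h1, h2, h5, List.replicate_succ]
        · have hlt : r.length < n := by simp at hn; omega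
          simp [stripA, scanToQuoteEnd, h1, h2, List.replicate_succ, ih _ hlt r rfl]

theorem stripA_double : ∀ cs : List Char,
    stripA cs false true false false =
      List.replicate (scanToQuoteEnd '"' cs).1 ' ' ++ stripA (scanToQuoteEnd '"' cs).2 false false false false := by
  intro cs
  induction hn : cs.length using Nat.strong_induction_on generalizing cs with
  | _ n ih =>
    cases cs with
    | nil => simp [stripA, scanToQuoteEnd]
    | cons c r =>
      by_cases h1 : c = '"' ∧ r.head? = some '"'
      · have hlt : r.tail.length < n := by subst hn; cases r <;> simp <;> omega
        simp [stripA, scanToQuoteEnd, h1, List.replicate_succ, ih _ hlt r.tail rfl]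
      · by_cases h2 : c = '"'
        · have h5 : ¬ r.head? = some '"' := fun hh => h1 ⟨h2, hh⟩
          simp [stripA, scanToQuoteEnd, h1, h2, h5, List.replicate_succ]
        · have hlt : r.length < n := by simp at hn; omega
          simp [stripA, scanToQuoteEnd, h1, h2, List.replicate_succ, ih _ hlt r rfl]

theorem stripA_eq_stripB : ∀ cs : List Char, stripA cs false false false false = stripB cs := by
  intro cs
  induction hn : cs.length using Nat.strong_induction_on generalizing cs with
  | _ n ih =>
    cases cs with
    | nil => simp [stripA, stripB]
    | cons c r =>
      by_cases h1 : c = '-' ∧ r.head? = some '-'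
      · have hlt : (scanToNl r.tail).2.length < n := by
          have := scanToNl_le r.tail
          have : r.tail.length ≤ r.length := by cases r <;> simp
          have := scanToNl_le r.tail
          subst hn; simp; omega
        simp [stripA, stripB, h1, stripA_line, List.replicate_succ, ih _ hlt _ rfl]
      · by_cases h2 : c = '/' ∧ r.head? = some '*'
        · have hlt : (scanToBlockEnd r.tail).2.length < n := by
            have := scanToBlockEnd_le r.tail
            have : r.tail.length ≤ r.length := by cases r <;> simp
            subst hn; simp; omega
          simp [stripA, stripB, h1, h2, stripA_block, List.replicate_succ, ih _ hlt _ rfl]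
        · by_cases h3 : c = '\''
          · subst h3
            have hlt : (scanToQuoteEnd '\'' r).2.length < n := by
              have := scanToQuoteEnd_le '\'' r; subst hn; simp; omega
            simp [stripA, stripB, h1, h2, stripA_single, List.replicate_succ, ih _ hlt _ rfl]
          · by_cases h4 : c = '"'
            · subst h4
              have hlt : (scanToQuoteEnd '"' r).2.length < n := by
                have := scanToQuoteEnd_le '"' r; subst hn; simp; omega
              simp [stripA, stripB, h1, h2, h3, stripA_double, List.replicate_succ, ih _ hlt _ rfl]
            · have hlt : r.length < n := by simp at hn; omega
              simp [stripA, stripB, h1, h2, h3, h4, ih _ hlt r rfl]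

-- ===== VERDICT (by name: the statement is the Claim_ definition above) =====
theorem strip_sql_comments_and_strings_py_spec : Claim_equal_strip_sql_comments_and_strings_py := by
  intro sql _
  unfold Spec_strip_sql_comments_and_strings_py strip_sql_comments_and_strings_py strip_sql_comments_and_strings_py_alt
  rw [stripA_eq_stripB]
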